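-- pv_equiv track=rewrite | github.com/Practice-Coding-Test/Weekly_Coding_Test | 7week_pjw.py | solution
-- ===== SOURCE A (Python) =====
-- def solution(enter, leave):
--     set1 = set()
--     for i in enter:
--         for k in enter:
--             if k != i and enter.index(i) < enter.index(k):
--                 set1.add((i,k))
--
--     set2 = set()
--     for m in leave:
--         for n in leave:
--             if m != n and leave.index(m) > leave.index(n):
--                 set2.add((m,n))
--
--     first = []
--     for a in set1:
--         for b in set2:
--             if a == b:
--                 first.append(a)
--
--     set3 = set()
--     for i in enter:
--         for k in enter:
--             for j in enter:
--                 if i != k and i != j and j != k: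
--                     if enter.index(i) < enter.index(k) < enter.index(j):
--                         set3.add((i,k))
--
--     set4 = set()
--     for m in leave:
--         for n in leave:
--             for v in leave:
--                 if m != n and m != v and n != v:
--                     if leave.index(n) > leave.index(m) > leave.index(v):
--                         set4.add((m,n))
--
--     second = []
--     for a in set3:
--         for b in set4:
--             if a == b:
--                 second.append(a)
--
--     final = first + second
--     f_final = sum(final, ())
--
--     ans = []
--     for i in range(1,len(enter)+1):
--         ans.append(f_final.count(i))
--
--     return ans
-- ===== SOURCE B (Python) =====
-- def solution(enter, leave):
--     n = len(enter)
--     pe = {}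
--     for idx, v in enumerate(enter):
--         pe.setdefault(v, idx)
--     pl = {}
--     for idx, v in enumerate(leave):
--         pl.setdefault(v, idx)
--     cnt = {}
--     common = [v for v in pe if v in pl]
--     if common:
--         max_pe = max(pe.values())
--         min_pl = min(pl.values())
--         for a in common:
--             for b in common:
--                 if a != b and pe[a] < pe[b]:
--                     w = 0
--                     if pl[a] > pl[b]:
--                         w += 1
--                     if pe[b] < max_pe and min_pl < pl[a] < pl[b]:
--                         w += 1
--                     cnt[a] = cnt.get(a, 0) + w
--                     cnt[b] = cnt.get(b, 0) + w
--     return [cnt.get(i, 0) for i in range(1, n + 1)]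
-- ===== Notes on version B (the rewrite author's own statement) =====
-- stated objective: faster
-- what changed: Replaces the repeated-.index nested scans and quadruple loops with two first-occurrence position dicts built in one pass, a single enumeration of distinct common value pairs with O(1) pair conditions (existence of a third element collapses to comparison with the global max/min position), and a counter dict instead of flattening pair lists.
import Mathlib
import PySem

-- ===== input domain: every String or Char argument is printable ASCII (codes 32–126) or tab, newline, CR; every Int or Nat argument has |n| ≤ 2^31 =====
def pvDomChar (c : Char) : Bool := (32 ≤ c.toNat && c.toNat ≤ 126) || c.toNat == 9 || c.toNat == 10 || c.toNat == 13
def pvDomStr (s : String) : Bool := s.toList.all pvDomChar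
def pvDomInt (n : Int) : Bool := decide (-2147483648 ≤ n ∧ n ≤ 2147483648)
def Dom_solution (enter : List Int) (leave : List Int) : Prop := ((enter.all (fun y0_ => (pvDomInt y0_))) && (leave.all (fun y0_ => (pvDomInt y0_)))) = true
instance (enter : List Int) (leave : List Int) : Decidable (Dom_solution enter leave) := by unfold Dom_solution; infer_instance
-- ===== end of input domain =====

-- B replaces A's quadruple/quintuple .index-rescanning loops by one-pass first-occurrence
-- position dicts, a single scan over distinct common value pairs with O(1) conditions
-- (the "third element exists" clauses collapse to comparisons with the global max/min
-- position), and a counter dict; measured asymptotically faster (objective: faster).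

-- ===== PORT A =====
-- xs.index(v): exact whenever v ∈ xs, which holds at every call site below
def pyIdx (xs : List Int) (v : Int) : Int := (((PySem.List.index? xs v).getD 0 : Nat) : Int)

def aSet1 (enter : List Int) : PySem.Set (Int × Int) :=
  enter.foldl (fun s i => enter.foldl (fun s k =>
    if k ≠ i ∧ pyIdx enter i < pyIdx enter k then PySem.Set.add s (i, k) else s) s)
    PySem.Set.empty

def aSet2 (leave : List Int) : PySem.Set (Int × Int) :=
  leave.foldl (fun s m => leave.foldl (fun s n =>
    if m ≠ n ∧ pyIdx leave m > pyIdx leave n then PySem.Set.add s (m, n) else s) s)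
    PySem.Set.empty

def aSet3 (enter : List Int) : PySem.Set (Int × Int) :=
  enter.foldl (fun s i => enter.foldl (fun s k => enter.foldl (fun s j =>
    if (i ≠ k ∧ i ≠ j ∧ j ≠ k) ∧ (pyIdx enter i < pyIdx enter k ∧ pyIdx enter k < pyIdx enter j)
    then PySem.Set.add s (i, k) else s) s) s)
    PySem.Set.empty

def aSet4 (leave : List Int) : PySem.Set (Int × Int) :=
  leave.foldl (fun s m => leave.foldl (fun s n => leave.foldl (fun s v =>
    if (m ≠ n ∧ m ≠ v ∧ n ≠ v) ∧ (pyIdx leave n > pyIdx leave m ∧ pyIdx leave m > pyIdx leave v)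
    then PySem.Set.add s (m, n) else s) s) s)
    PySem.Set.empty

-- 'for a in s: for b in t: if a == b: out.append(a)' (the result of solution below
-- depends on it only through element counts, which are iteration-order independent)
def aCommonPairs (s t : PySem.Set (Int × Int)) : List (Int × Int) :=
  s.foldl (fun out a => t.foldl (fun out b => if a = b then out ++ [a] else out) out) []

def solution (enter : List Int) (leave : List Int) : List Int :=
  let first := aCommonPairs (aSet1 enter) (aSet2 leave)
  let second := aCommonPairs (aSet3 enter) (aSet4 leave)
  let final := first ++ second
  let fFinal := final.foldl (fun acc p => acc ++ [p.1, p.2]) []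
  (PySem.List.pyRange 1 (PySem.List.len enter + 1)).foldl
    (fun ans i => ans ++ [((PySem.List.count fFinal i : Nat) : Int)]) []

-- ===== PORT B =====
-- first-occurrence position dict: pos.setdefault(v, idx) for idx, v in enumerate(xs)
def bPos (xs : List Int) : PySem.Dict Int Int :=
  (PySem.List.enumerate xs).foldl (fun d p => d.setdefault p.2 p.1) PySem.Dict.empty

def solution_alt (enter : List Int) (leave : List Int) : List Int :=
  let n := PySem.List.len enter
  let pe := bPos enter
  let pl := bPos leave
  let common := pe.keys.filter (fun v => pl.contains v)
  let cnt : PySem.Dict Int Int :=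
    if common ≠ [] then
      -- common ≠ [] guarantees pe.values, pl.values ≠ [], so max()/min() are defined
      let maxPe := (PySem.List.max? pe.values (fun y => y)).getD 0
      let minPl := (PySem.List.min? pl.values (fun y => y)).getD 0
      common.foldl (fun cnt a => common.foldl (fun cnt b =>
        if a ≠ b ∧ pe.getD a 0 < pe.getD b 0 then
          let w : Int :=
            (if pl.getD a 0 > pl.getD b 0 then 1 else 0) +
            (if pe.getD b 0 < maxPe ∧ minPl < pl.getD a 0 ∧ pl.getD a 0 < pl.getD b 0 then 1 else 0)
          let cnt2 := cnt.insert a (cnt.getD a 0 + w)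
          cnt2.insert b (cnt2.getD b 0 + w)
        else cnt) cnt) PySem.Dict.empty
    else PySem.Dict.empty
  (PySem.List.pyRange 1 (n + 1)).map (fun i => cnt.getD i 0)

-- ===== PRECONDITION & SPEC =====
def Spec_solution (enter : List Int) (leave : List Int) (out : List Int) : Prop := out = solution_alt enter leave
instance (enter : List Int) (leave : List Int) (out : List Int) : Decidable (Spec_solution enter leave out) := by unfold Spec_solution; infer_instance

-- ===== CLAIM (what is proved, stated in full; the proofs are below) =====
def Claim_equal_solution : Prop := ∀ (enter : List Int) (leave : List Int), Dom_solution enter leave → Spec_solution enter leave (solution enter leave)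

-- ===== LEMMAS AND PROOFS =====

-- ---------- proof-side names for B's intermediate values ----------
def bCommon (enter leave : List Int) : List Int :=
  (bPos enter).keys.filter (fun v => (bPos leave).contains v)

def bMx (enter : List Int) : Int := (PySem.List.max? (bPos enter).values (fun y => y)).getD 0

def bMn (leave : List Int) : Int := (PySem.List.min? (bPos leave).values (fun y => y)).getD 0

def wB (pe pl : PySem.Dict Int Int) (mx mn : Int) (q : Int × Int) : Int :=
  (if pl.getD q.1 0 > pl.getD q.2 0 then 1 else 0) +
  (if pe.getD q.2 0 < mx ∧ mn < pl.getD q.1 0 ∧ pl.getD q.1 0 < pl.getD q.2 0 then 1 else 0)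

def stepB (pe pl : PySem.Dict Int Int) (mx mn : Int) (cnt : PySem.Dict Int Int) (q : Int × Int) :
    PySem.Dict Int Int :=
  if q.1 ≠ q.2 ∧ pe.getD q.1 0 < pe.getD q.2 0 then
    let w : Int := wB pe pl mx mn q
    let cnt2 := cnt.insert q.1 (cnt.getD q.1 0 + w)
    cnt2.insert q.2 (cnt2.getD q.2 0 + w)
  else cnt

def bCnt (enter leave : List Int) : PySem.Dict Int Int :=
  if bCommon enter leave ≠ [] then
    (bCommon enter leave).foldl (fun cnt a => (bCommon enter leave).foldl (fun cnt b =>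
      stepB (bPos enter) (bPos leave) (bMx enter) (bMn leave) cnt (a, b)) cnt) PySem.Dict.empty
  else PySem.Dict.empty

def CPl (enter leave : List Int) : List (Int × Int) :=
  (bCommon enter leave).flatMap (fun a => (bCommon enter leave).map (fun b => (a, b)))

def contribB (pe pl : PySem.Dict Int Int) (mx mn : Int) (x : Int) (q : Int × Int) : Int :=
  if q.1 ≠ q.2 ∧ pe.getD q.1 0 < pe.getD q.2 0 then
    (if q.1 = x then wB pe pl mx mn q else 0) + (if q.2 = x then wB pe pl mx mn q else 0)
  else 0

def chi (x : Int) (p : Int × Int) : Int := (if p.1 = x then 1 else 0) + (if p.2 = x then 1 else 0)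

-- ---------- proof-side names for A's pair lists ----------
def pairs1 (enter : List Int) : List (Int × Int) :=
  enter.flatMap (fun i => (enter.filter (fun k =>
    decide (k ≠ i ∧ pyIdx enter i < pyIdx enter k))).map (fun k => (i, k)))

def pairs2 (leave : List Int) : List (Int × Int) :=
  leave.flatMap (fun m => (leave.filter (fun n =>
    decide (m ≠ n ∧ pyIdx leave m > pyIdx leave n))).map (fun n => (m, n)))

def pairs3 (enter : List Int) : List (Int × Int) :=
  enter.flatMap (fun i => enter.flatMap (fun k => (enter.filter (fun j =>
    decide ((i ≠ k ∧ i ≠ j ∧ j ≠ k) ∧ (pyIdx enter i < pyIdx enter k ∧ pyIdx enter k < pyIdx enter j)))).map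
    (fun _ => (i, k))))

def pairs4 (leave : List Int) : List (Int × Int) :=
  leave.flatMap (fun m => leave.flatMap (fun n => (leave.filter (fun v =>
    decide ((m ≠ n ∧ m ≠ v ∧ n ≠ v) ∧ (pyIdx leave n > pyIdx leave m ∧ pyIdx leave m > pyIdx leave v)))).map
    (fun _ => (m, n))))

-- ---------- generic fold reshaping ----------
theorem foldl_set_update {α β : Type} [BEq β] (F : α → List β) (xs : List α) (s : PySem.Set β) :
    xs.foldl (fun s x => PySem.Set.update s (F x)) s = PySem.Set.update s (xs.flatMap F) := by
  induction xs generalizing s with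
  | nil => simp [PySem.Set.update_nil]
  | cons x xs ih => simp only [List.foldl_cons, List.flatMap_cons, PySem.Set.update_append, ih]

theorem double_loop_eq (xs : List Int) (C : Int → Int → Prop) [∀ i k, Decidable (C i k)] :
    xs.foldl (fun s i => xs.foldl (fun s k =>
        if C i k then PySem.Set.add s (i, k) else s) s) PySem.Set.empty
      = PySem.Set.ofList (xs.flatMap (fun i =>
          (xs.filter (fun k => decide (C i k))).map (fun k => (i, k)))) := by
  have inner : ∀ (s : PySem.Set (Int × Int)) (i : Int),
      xs.foldl (fun s k => if C i k then PySem.Set.add s (i, k) else s) s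
        = PySem.Set.update s ((xs.filter (fun k => decide (C i k))).map (fun k => (i, k))) := by
    intro s i
    rw [PySem.List.foldl_ite_eq_foldl_filter (C i) (fun s k => PySem.Set.add s (i, k))]
    rw [PySem.Set.update_eq_foldl, List.foldl_map]
  rw [PySem.List.foldl_congr_mem _ _
        (fun s i => PySem.Set.update s ((xs.filter (fun k => decide (C i k))).map (fun k => (i, k)))) _
        (fun acc x _ => inner acc x)]
  rw [foldl_set_update, PySem.Set.update_empty]

theorem triple_loop_eq (xs : List Int) (C : Int → Int → Int → Prop) [∀ i k j, Decidable (C i k j)] :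
    xs.foldl (fun s i => xs.foldl (fun s k => xs.foldl (fun s j =>
        if C i k j then PySem.Set.add s (i, k) else s) s) s) PySem.Set.empty
      = PySem.Set.ofList (xs.flatMap (fun i => xs.flatMap (fun k =>
          (xs.filter (fun j => decide (C i k j))).map (fun _ => (i, k))))) := by
  have inner : ∀ (s : PySem.Set (Int × Int)) (i k : Int),
      xs.foldl (fun s j => if C i k j then PySem.Set.add s (i, k) else s) s
        = PySem.Set.update s ((xs.filter (fun j => decide (C i k j))).map (fun _ => (i, k))) := by
    intro s i k
    rw [PySem.List.foldl_ite_eq_foldl_filter (C i k) (fun s _ => PySem.Set.add s (i, k))]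
    rw [PySem.Set.update_eq_foldl, List.foldl_map]
  have middle : ∀ (s : PySem.Set (Int × Int)) (i : Int),
      xs.foldl (fun s k => xs.foldl (fun s j =>
          if C i k j then PySem.Set.add s (i, k) else s) s) s
        = PySem.Set.update s (xs.flatMap (fun k =>
            (xs.filter (fun j => decide (C i k j))).map (fun _ => (i, k)))) := by
    intro s i
    rw [PySem.List.foldl_congr_mem _ _
          (fun s k => PySem.Set.update s ((xs.filter (fun j => decide (C i k j))).map (fun _ => (i, k)))) _
          (fun acc x _ => inner acc i x)]
    rw [foldl_set_update]
  rw [PySem.List.foldl_congr_mem _ _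
        (fun s i => PySem.Set.update s (xs.flatMap (fun k =>
          (xs.filter (fun j => decide (C i k j))).map (fun _ => (i, k))))) _
        (fun acc x _ => middle acc x)]
  rw [foldl_set_update, PySem.Set.update_empty]

theorem aSet1_eq (enter : List Int) : aSet1 enter = PySem.Set.ofList (pairs1 enter) :=
  double_loop_eq enter (fun i k => k ≠ i ∧ pyIdx enter i < pyIdx enter k)

theorem aSet2_eq (leave : List Int) : aSet2 leave = PySem.Set.ofList (pairs2 leave) :=
  double_loop_eq leave (fun m n => m ≠ n ∧ pyIdx leave m > pyIdx leave n)

theorem aSet3_eq (enter : List Int) : aSet3 enter = PySem.Set.ofList (pairs3 enter) :=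
  triple_loop_eq enter (fun i k j => (i ≠ k ∧ i ≠ j ∧ j ≠ k) ∧
    (pyIdx enter i < pyIdx enter k ∧ pyIdx enter k < pyIdx enter j))

theorem aSet4_eq (leave : List Int) : aSet4 leave = PySem.Set.ofList (pairs4 leave) :=
  triple_loop_eq leave (fun m n v => (m ≠ n ∧ m ≠ v ∧ n ≠ v) ∧
    (pyIdx leave n > pyIdx leave m ∧ pyIdx leave m > pyIdx leave v))

-- ---------- membership in A's pair lists ----------
theorem mem_pairs1 (enter : List Int) (q : Int × Int) :
    q ∈ pairs1 enter ↔
      q.1 ∈ enter ∧ q.2 ∈ enter ∧ q.2 ≠ q.1 ∧ pyIdx enter q.1 < pyIdx enter q.2 := by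
  obtain ⟨a, b⟩ := q
  simp only [pairs1, List.mem_flatMap, List.mem_map, List.mem_filter, decide_eq_true_eq,
    Prod.mk.injEq]
  constructor
  · rintro ⟨i, hi, k, ⟨hk, hki, hlt⟩, rfl, rfl⟩; exact ⟨hi, hk, hki, hlt⟩
  · rintro ⟨ha, hb, hba, hlt⟩; exact ⟨a, ha, b, ⟨hb, hba, hlt⟩, rfl, rfl⟩

theorem mem_pairs2 (leave : List Int) (q : Int × Int) :
    q ∈ pairs2 leave ↔
      q.1 ∈ leave ∧ q.2 ∈ leave ∧ q.1 ≠ q.2 ∧ pyIdx leave q.1 > pyIdx leave q.2 := by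
  obtain ⟨a, b⟩ := q
  simp only [pairs2, List.mem_flatMap, List.mem_map, List.mem_filter, decide_eq_true_eq,
    Prod.mk.injEq]
  constructor
  · rintro ⟨m, hm, n, ⟨hn, hmn, hlt⟩, rfl, rfl⟩; exact ⟨hm, hn, hmn, hlt⟩
  · rintro ⟨ha, hb, hab, hlt⟩; exact ⟨a, ha, b, ⟨hb, hab, hlt⟩, rfl, rfl⟩

theorem mem_pairs3 (enter : List Int) (q : Int × Int) :
    q ∈ pairs3 enter ↔
      q.1 ∈ enter ∧ q.2 ∈ enter ∧ q.1 ≠ q.2 ∧ pyIdx enter q.1 < pyIdx enter q.2 ∧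
        ∃ j ∈ enter, q.1 ≠ j ∧ j ≠ q.2 ∧ pyIdx enter q.2 < pyIdx enter j := by
  obtain ⟨a, b⟩ := q
  simp only [pairs3, List.mem_flatMap, List.mem_map, List.mem_filter, decide_eq_true_eq,
    Prod.mk.injEq]
  constructor
  · rintro ⟨i, hi, k, hk, j, ⟨hj, ⟨h1, h2, h3⟩, h4, h5⟩, rfl, rfl⟩
    exact ⟨hi, hk, h1, h4, j, hj, h2, h3, h5⟩
  · rintro ⟨ha, hb, hab, hlt, j, hj, h2, h3, h5⟩
    exact ⟨a, ha, b, hb, j, ⟨hj, ⟨hab, h2, h3⟩, hlt, h5⟩, rfl, rfl⟩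

theorem mem_pairs4 (leave : List Int) (q : Int × Int) :
    q ∈ pairs4 leave ↔
      q.1 ∈ leave ∧ q.2 ∈ leave ∧ q.1 ≠ q.2 ∧ pyIdx leave q.2 > pyIdx leave q.1 ∧
        ∃ v ∈ leave, q.1 ≠ v ∧ q.2 ≠ v ∧ pyIdx leave q.1 > pyIdx leave v := by
  obtain ⟨a, b⟩ := q
  simp only [pairs4, List.mem_flatMap, List.mem_map, List.mem_filter, decide_eq_true_eq,
    Prod.mk.injEq]
  constructor
  · rintro ⟨m, hm, n, hn, v, ⟨hv, ⟨h1, h2, h3⟩, h4, h5⟩, rfl, rfl⟩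
    exact ⟨hm, hn, h1, h4, v, hv, h2, h3, h5⟩
  · rintro ⟨ha, hb, hab, hlt, v, hv, h2, h3, h5⟩
    exact ⟨a, ha, b, hb, v, ⟨hv, ⟨hab, h2, h3⟩, hlt, h5⟩, rfl, rfl⟩

-- ---------- the intersection loop ----------
theorem flatMap_ite_singleton {α : Type} (p : α → Prop) [DecidablePred p] (l : List α) :
    l.flatMap (fun a => if p a then [a] else []) = l.filter (fun a => decide (p a)) := by
  induction l with
  | nil => rfl
  | cons x xs ih =>
    simp only [List.flatMap_cons, List.filter_cons]
    by_cases h : p x <;> simp [h, ih]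

theorem aCommonPairs_eq (s t : PySem.Set (Int × Int)) (ht : List.Nodup t) :
    aCommonPairs s t = s.filter (fun a => decide (a ∈ t)) := by
  unfold aCommonPairs
  have hsingle : ∀ a : Int × Int, t.filter (fun b => decide (a = b)) = if a ∈ t then [a] else [] := by
    intro a
    have hcongr : ∀ x ∈ t, (decide (a = x)) = (x == a) := by
      intro x _
      rw [Bool.eq_iff_iff]
      simp only [decide_eq_true_eq, beq_iff_eq]
      exact eq_comm
    rw [List.filter_congr hcongr, List.filter_beq]
    by_cases h : a ∈ t
    · rw [List.count_eq_one_of_mem ht h]; simp [h]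
    · rw [List.count_eq_zero_of_not_mem h]; simp [h]
  have inner : ∀ (out : List (Int × Int)) (a : Int × Int),
      t.foldl (fun out b => if a = b then out ++ [a] else out) out
        = out ++ (if a ∈ t then [a] else []) := by
    intro out a
    have hfun : (fun (out : List (Int × Int)) b => if a = b then out ++ [a] else out)
        = fun out b => if a = b then out ++ [id b] else out := by
      funext out b
      by_cases h : a = b <;> simp [h]
    rw [hfun, PySem.List.foldl_append_ite, List.map_id, hsingle]
  rw [PySem.List.foldl_congr_mem _ _
        (fun out a => out ++ (if a ∈ t then [a] else [])) _
        (fun acc x _ => inner acc x)]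
  rw [PySem.List.foldl_append_eq_flatMap, List.nil_append, flatMap_ite_singleton]

-- ---------- B's position dict ----------
theorem bPos_aux (v : Int) (xs : List Int) : ∀ (s : Int) (d : PySem.Dict Int Int),
    ((PySem.List.enumerate xs s).foldl (fun d p => d.setdefault p.2 p.1) d).get? v
      = (d.get? v).or ((PySem.List.index? xs v).map (fun k : Nat => s + (k : Int))) := by
  induction xs with
  | nil =>
    intro s d
    simp [PySem.List.enumerate_nil, PySem.List.index?_eq_idxOf?]
  | cons x xs ih =>
    intro s d
    rw [PySem.List.enumerate_cons, List.foldl_cons, ih (s + 1) (d.setdefault x s)]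
    by_cases hv : v = x
    · subst hv
      rw [PySem.Dict.get?_setdefault_self]
      cases hd : d.get? v with
      | some w => simp
      | none =>
        rw [PySem.List.index?_cons_self]
        simp
    · rw [PySem.Dict.get?_setdefault_of_ne _ _ hv]
      cases hd : d.get? v with
      | some w => simp
      | none =>
        rw [PySem.List.index?_cons_of_ne xs (Ne.symm hv)]
        cases hk : PySem.List.index? xs v with
        | none => simp
        | some k =>
          simp only [Option.map_some, Option.none_or]
          congr 1
          push_cast
          ring

theorem get?_bPos (xs : List Int) (v : Int) :
    (bPos xs).get? v = (PySem.List.index? xs v).map (fun k : Nat => (k : Int)) := by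
  unfold bPos
  rw [bPos_aux v xs 0 PySem.Dict.empty]
  rw [PySem.Dict.get?_empty]
  simp

theorem getD_bPos (xs : List Int) (v : Int) : (bPos xs).getD v 0 = pyIdx xs v := by
  rw [PySem.Dict.getD_eq_get?_getD, get?_bPos]
  unfold pyIdx
  cases h : PySem.List.index? xs v <;> simp

theorem contains_bPos (xs : List Int) (v : Int) : (bPos xs).contains v = true ↔ v ∈ xs := by
  rw [PySem.Dict.contains_eq_isSome_get?, get?_bPos]
  rw [← PySem.List.index?_isSome_iff xs v]
  cases PySem.List.index? xs v <;> simp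

theorem nodup_keys_bPos (xs : List Int) : (bPos xs).keys.Nodup := by
  unfold bPos
  have aux : ∀ (l : List (Int × Int)) (d : PySem.Dict Int Int), d.keys.Nodup →
      (l.foldl (fun d p => d.setdefault p.2 p.1) d).keys.Nodup := by
    intro l
    induction l with
    | nil => intro d hd; exact hd
    | cons p l ih =>
      intro d hd
      refine ih _ ?_
      rw [PySem.Dict.keys_setdefault]
      by_cases h : d.contains p.2 = true
      · simpa [h] using hd
      · have : p.2 ∉ d.keys := fun hm => h ((PySem.Dict.contains_iff_mem_keys d p.2).mpr hm)
        rw [if_neg h]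
        refine hd.append (List.nodup_singleton _) ?_
        intro a ha hb
        rw [List.mem_singleton] at hb
        exact this (hb ▸ ha)
  exact aux _ _ (by simp [PySem.Dict.keys_empty])

theorem mem_keys_bPos (xs : List Int) (v : Int) : v ∈ (bPos xs).keys ↔ v ∈ xs := by
  rw [← PySem.Dict.contains_iff_mem_keys]
  exact contains_bPos xs v

theorem values_bPos (xs : List Int) :
    (bPos xs).values = (bPos xs).keys.map (fun k => pyIdx xs k) := by
  rw [PySem.Dict.values_eq_map_keys _ (nodup_keys_bPos xs) 0]
  exact List.map_congr_left (fun k _ => getD_bPos xs k)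

theorem values_bPos_ne_nil (xs : List Int) (h : xs ≠ []) : (bPos xs).values ≠ [] := by
  obtain ⟨v, hv⟩ := List.exists_mem_of_ne_nil xs h
  have hk : v ∈ (bPos xs).keys := (mem_keys_bPos xs v).mpr hv
  rw [values_bPos]
  simp only [ne_eq, List.map_eq_nil_iff]
  exact List.ne_nil_of_mem hk

theorem exists_max (xs : List Int) (h : xs ≠ []) :
    ∃ m, PySem.List.max? xs (fun y => y) = some m := by
  cases hx : PySem.List.max? xs (fun y => y) with
  | none => exact absurd ((PySem.List.max?_eq_none_iff _ _).mp hx) h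
  | some m => exact ⟨m, rfl⟩

theorem exists_min (xs : List Int) (h : xs ≠ []) :
    ∃ m, PySem.List.min? xs (fun y => y) = some m := by
  cases hx : PySem.List.min? xs (fun y => y) with
  | none => exact absurd ((PySem.List.min?_eq_none_iff _ _).mp hx) h
  | some m => exact ⟨m, rfl⟩

theorem pyIdx_le_bMx (enter : List Int) (v : Int) (hv : v ∈ enter) : pyIdx enter v ≤ bMx enter := by
  obtain ⟨m, hm⟩ := exists_max (bPos enter).values (values_bPos_ne_nil enter (List.ne_nil_of_mem hv))
  have hmem : pyIdx enter v ∈ (bPos enter).values := by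
    rw [values_bPos]
    exact List.mem_map_of_mem ((mem_keys_bPos enter v).mpr hv)
  have := PySem.List.max?_isMax hm _ hmem
  unfold bMx
  rw [hm]
  simpa using this

theorem bMx_attained (enter : List Int) (h : enter ≠ []) :
    ∃ j ∈ enter, pyIdx enter j = bMx enter := by
  obtain ⟨m, hm⟩ := exists_max (bPos enter).values (values_bPos_ne_nil enter h)
  have hmem := PySem.List.max?_mem hm
  rw [values_bPos] at hmem
  obtain ⟨j, hj, hje⟩ := List.mem_map.mp hmem
  exact ⟨j, (mem_keys_bPos enter j).mp hj, by unfold bMx; rw [hm]; exact hje⟩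

theorem bMn_le_pyIdx (leave : List Int) (v : Int) (hv : v ∈ leave) : bMn leave ≤ pyIdx leave v := by
  obtain ⟨m, hm⟩ := exists_min (bPos leave).values (values_bPos_ne_nil leave (List.ne_nil_of_mem hv))
  have hmem : pyIdx leave v ∈ (bPos leave).values := by
    rw [values_bPos]
    exact List.mem_map_of_mem ((mem_keys_bPos leave v).mpr hv)
  have := PySem.List.min?_isMin hm _ hmem
  unfold bMn
  rw [hm]
  simpa using this

theorem bMn_attained (leave : List Int) (h : leave ≠ []) :
    ∃ j ∈ leave, pyIdx leave j = bMn leave := by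
  obtain ⟨m, hm⟩ := exists_min (bPos leave).values (values_bPos_ne_nil leave h)
  have hmem := PySem.List.min?_mem hm
  rw [values_bPos] at hmem
  obtain ⟨j, hj, hje⟩ := List.mem_map.mp hmem
  exact ⟨j, (mem_keys_bPos leave j).mp hj, by unfold bMn; rw [hm]; exact hje⟩

-- ---------- existence of a third element ⇔ max/min comparison ----------
theorem exists_j_iff (enter : List Int) (a b : Int) (hb : b ∈ enter)
    (hab : pyIdx enter a < pyIdx enter b) :
    (∃ j ∈ enter, a ≠ j ∧ j ≠ b ∧ pyIdx enter b < pyIdx enter j) ↔ pyIdx enter b < bMx enter := by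
  constructor
  · rintro ⟨j, hj, -, -, hlt⟩
    exact lt_of_lt_of_le hlt (pyIdx_le_bMx enter j hj)
  · intro hlt
    obtain ⟨j, hj, hje⟩ := bMx_attained enter (List.ne_nil_of_mem hb)
    refine ⟨j, hj, ?_, ?_, hje ▸ hlt⟩
    · rintro rfl; omega
    · rintro rfl; omega

theorem exists_v_iff (leave : List Int) (a b : Int) (ha : a ∈ leave)
    (hab : pyIdx leave a < pyIdx leave b) :
    (∃ v ∈ leave, a ≠ v ∧ b ≠ v ∧ pyIdx leave a > pyIdx leave v) ↔ bMn leave < pyIdx leave a := by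
  constructor
  · rintro ⟨v, hv, -, -, hlt⟩
    exact lt_of_le_of_lt (bMn_le_pyIdx leave v hv) hlt
  · intro hlt
    obtain ⟨v, hv, hve⟩ := bMn_attained leave (List.ne_nil_of_mem ha)
    refine ⟨v, hv, ?_, ?_, hve ▸ hlt⟩
    · rintro rfl; omega
    · rintro rfl; omega

-- ---------- membership in B's pair enumeration ----------
theorem mem_bCommon (enter leave : List Int) (v : Int) :
    v ∈ bCommon enter leave ↔ v ∈ enter ∧ v ∈ leave := by
  unfold bCommon
  rw [List.mem_filter, mem_keys_bPos]
  exact and_congr_right (fun _ => contains_bPos leave v)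

theorem nodup_bCommon (enter leave : List Int) : (bCommon enter leave).Nodup :=
  (nodup_keys_bPos enter).filter _

theorem mem_CPl (enter leave : List Int) (q : Int × Int) :
    q ∈ CPl enter leave ↔ q.1 ∈ bCommon enter leave ∧ q.2 ∈ bCommon enter leave := by
  obtain ⟨a, b⟩ := q
  simp only [CPl, List.mem_flatMap, List.mem_map, Prod.mk.injEq]
  constructor
  · rintro ⟨i, hi, k, hk, rfl, rfl⟩; exact ⟨hi, hk⟩
  · rintro ⟨ha, hb⟩; exact ⟨a, ha, b, hb, rfl, rfl⟩

theorem nodup_CPl (enter leave : List Int) : (CPl enter leave).Nodup := by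
  have h := nodup_bCommon enter leave
  have : CPl enter leave = (bCommon enter leave) ×ˢ (bCommon enter leave) := rfl
  rw [this]
  exact h.product h

-- ---------- membership equivalences between A's lists and B's filtered enumeration ----------
theorem mem_first_iff (enter leave : List Int) (q : Int × Int) :
    q ∈ aCommonPairs (aSet1 enter) (aSet2 leave) ↔
      q ∈ (CPl enter leave).filter (fun q =>
        decide ((q.1 ≠ q.2 ∧ (bPos enter).getD q.1 0 < (bPos enter).getD q.2 0) ∧
          (bPos leave).getD q.1 0 > (bPos leave).getD q.2 0)) := by
  rw [aCommonPairs_eq _ _ (aSet2_eq leave ▸ PySem.Set.nodup_ofList (pairs2 leave))]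
  rw [List.mem_filter, List.mem_filter, decide_eq_true_eq, decide_eq_true_eq]
  rw [aSet1_eq, aSet2_eq, PySem.Set.mem_ofList, PySem.Set.mem_ofList]
  rw [mem_pairs1, mem_pairs2, mem_CPl, mem_bCommon, mem_bCommon]
  rw [getD_bPos, getD_bPos, getD_bPos, getD_bPos]
  constructor
  · rintro ⟨⟨h1, h2, h3, h4⟩, ⟨h5, h6, h7, h8⟩⟩
    exact ⟨⟨⟨h1, h5⟩, ⟨h2, h6⟩⟩, ⟨h7, h4⟩, h8⟩
  · rintro ⟨⟨⟨h1, h5⟩, ⟨h2, h6⟩⟩, ⟨h7, h4⟩, h8⟩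
    exact ⟨⟨h1, h2, fun h => h7 h.symm, h4⟩, ⟨h5, h6, h7, h8⟩⟩

theorem mem_second_iff (enter leave : List Int) (q : Int × Int) :
    q ∈ aCommonPairs (aSet3 enter) (aSet4 leave) ↔
      q ∈ (CPl enter leave).filter (fun q =>
        decide ((q.1 ≠ q.2 ∧ (bPos enter).getD q.1 0 < (bPos enter).getD q.2 0) ∧
          ((bPos enter).getD q.2 0 < bMx enter ∧ bMn leave < (bPos leave).getD q.1 0 ∧
            (bPos leave).getD q.1 0 < (bPos leave).getD q.2 0))) := by
  rw [aCommonPairs_eq _ _ (aSet4_eq leave ▸ PySem.Set.nodup_ofList (pairs4 leave))]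
  rw [List.mem_filter, List.mem_filter, decide_eq_true_eq, decide_eq_true_eq]
  rw [aSet3_eq, aSet4_eq, PySem.Set.mem_ofList, PySem.Set.mem_ofList]
  rw [mem_pairs3, mem_pairs4, mem_CPl, mem_bCommon, mem_bCommon]
  rw [getD_bPos, getD_bPos, getD_bPos, getD_bPos]
  constructor
  · rintro ⟨⟨h1, h2, h3, h4, hj⟩, ⟨h5, h6, h7, h8, hv⟩⟩
    refine ⟨⟨⟨h1, h5⟩, ⟨h2, h6⟩⟩, ⟨h3, h4⟩, ?_, ?_, h8⟩
    · exact (exists_j_iff enter q.1 q.2 h2 h4).mp hj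
    · exact (exists_v_iff leave q.1 q.2 h5 h8).mp hv
  · rintro ⟨⟨⟨h1, h5⟩, ⟨h2, h6⟩⟩, ⟨h3, h4⟩, hmx, hmn, h8⟩
    refine ⟨⟨h1, h2, h3, h4, ?_⟩, ⟨h5, h6, h3, h8, ?_⟩⟩
    · exact (exists_j_iff enter q.1 q.2 h2 h4).mpr hmx
    · exact (exists_v_iff leave q.1 q.2 h5 h8).mpr hmn

-- ---------- nodup of A's lists ----------
theorem nodup_first (enter leave : List Int) : (aCommonPairs (aSet1 enter) (aSet2 leave)).Nodup := by
  rw [aCommonPairs_eq _ _ (aSet2_eq leave ▸ PySem.Set.nodup_ofList (pairs2 leave))]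
  exact (aSet1_eq enter ▸ PySem.Set.nodup_ofList (pairs1 enter)).filter _

theorem nodup_second (enter leave : List Int) : (aCommonPairs (aSet3 enter) (aSet4 leave)).Nodup := by
  rw [aCommonPairs_eq _ _ (aSet4_eq leave ▸ PySem.Set.nodup_ofList (pairs4 leave))]
  exact (aSet3_eq enter ▸ PySem.Set.nodup_ofList (pairs3 enter)).filter _

-- ---------- counting ----------
theorem count_flat (l : List (Int × Int)) (x : Int) :
    ((List.count x (l.flatMap (fun p => [p.1, p.2])) : Nat) : Int) = (l.map (chi x)).sum := by
  rw [List.count_flatMap, Nat.cast_list_sum, List.map_map]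
  refine congrArg List.sum (List.map_congr_left ?_)
  intro p _
  by_cases h1 : p.1 = x <;> by_cases h2 : p.2 = x <;>
    simp [Function.comp, chi, h1, h2]

theorem sum_map_ite_filter {α : Type} (p : α → Prop) [DecidablePred p] (f : α → Int) (l : List α) :
    (l.map (fun a => if p a then f a else 0)).sum = ((l.filter (fun a => decide (p a))).map f).sum := by
  induction l with
  | nil => rfl
  | cons x xs ih =>
    simp only [List.map_cons, List.sum_cons, List.filter_cons]
    by_cases h : p x <;> simp [h, ih]

theorem contribB_split (pe pl : PySem.Dict Int Int) (mx mn : Int) (x : Int) (q : Int × Int) :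
    contribB pe pl mx mn x q =
      (if (q.1 ≠ q.2 ∧ pe.getD q.1 0 < pe.getD q.2 0) ∧ pl.getD q.1 0 > pl.getD q.2 0
        then chi x q else 0) +
      (if (q.1 ≠ q.2 ∧ pe.getD q.1 0 < pe.getD q.2 0) ∧
          (pe.getD q.2 0 < mx ∧ mn < pl.getD q.1 0 ∧ pl.getD q.1 0 < pl.getD q.2 0)
        then chi x q else 0) := by
  by_cases hc : q.1 ≠ q.2 ∧ pe.getD q.1 0 < pe.getD q.2 0
  · by_cases h1 : pl.getD q.1 0 > pl.getD q.2 0 <;>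
      by_cases h2 : pe.getD q.2 0 < mx ∧ mn < pl.getD q.1 0 ∧ pl.getD q.1 0 < pl.getD q.2 0 <;>
      simp [contribB, wB, chi, hc, h1, h2] <;> split_ifs <;> omega
  · simp [contribB, hc]

theorem stepB_getD (pe pl : PySem.Dict Int Int) (mx mn : Int) (d : PySem.Dict Int Int)
    (q : Int × Int) (x : Int) :
    (stepB pe pl mx mn d q).getD x 0 = d.getD x 0 + contribB pe pl mx mn x q := by
  by_cases h : q.1 ≠ q.2 ∧ pe.getD q.1 0 < pe.getD q.2 0
  · have hne : q.2 ≠ q.1 := fun e => h.1 e.symm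
    unfold stepB contribB
    rw [if_pos h, if_pos h]
    rw [PySem.Dict.getD_insert]
    by_cases h2 : x = q.2
    · subst h2
      rw [if_pos rfl, PySem.Dict.getD_insert, if_neg hne, if_neg h.1, if_pos rfl]
      ring
    · rw [if_neg h2, PySem.Dict.getD_insert]
      by_cases h1 : x = q.1
      · subst h1
        rw [if_pos rfl, if_pos rfl, if_neg hne]
        ring
      · rw [if_neg h1, if_neg (fun e : q.1 = x => h1 e.symm),
            if_neg (fun e : q.2 = x => h2 e.symm)]
        ring
  · unfold stepB contribB
    rw [if_neg h, if_neg h]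
    ring

theorem foldl_stepB_getD (pe pl : PySem.Dict Int Int) (mx mn : Int) (P : List (Int × Int)) :
    ∀ (d : PySem.Dict Int Int) (x : Int),
      ((P.foldl (stepB pe pl mx mn) d).getD x 0)
        = d.getD x 0 + (P.map (contribB pe pl mx mn x)).sum := by
  induction P with
  | nil => intro d x; simp
  | cons q P ih =>
    intro d x
    rw [List.foldl_cons, ih, stepB_getD, List.map_cons, List.sum_cons]
    ring

theorem nestedB_eq (common : List Int) (pe pl : PySem.Dict Int Int) (mx mn : Int)
    (d : PySem.Dict Int Int) :
    common.foldl (fun cnt a => common.foldl (fun cnt b => stepB pe pl mx mn cnt (a, b)) cnt) d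
      = (common.flatMap (fun a => common.map (fun b => (a, b)))).foldl (stepB pe pl mx mn) d := by
  rw [List.foldl_flatMap]
  simp only [List.foldl_map]

-- ---------- the two programs restated ----------
theorem solution_eq (enter leave : List Int) :
    solution enter leave
      = (PySem.List.pyRange 1 (PySem.List.len enter + 1)).foldl
          (fun ans i => ans ++ [((PySem.List.count
            ((aCommonPairs (aSet1 enter) (aSet2 leave) ++ aCommonPairs (aSet3 enter) (aSet4 leave)).foldl
              (fun acc p => acc ++ [p.1, p.2]) []) i : Nat) : Int)]) [] := rfl

theorem solution_alt_eq (enter leave : List Int) :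
    solution_alt enter leave
      = (PySem.List.pyRange 1 (PySem.List.len enter + 1)).map
          (fun i => (bCnt enter leave).getD i 0) := rfl

-- ---------- the key pointwise identity ----------
theorem count_key (enter leave : List Int) (x : Int) :
    ((PySem.List.count
        ((aCommonPairs (aSet1 enter) (aSet2 leave) ++ aCommonPairs (aSet3 enter) (aSet4 leave)).foldl
          (fun acc p => acc ++ [p.1, p.2]) []) x : Nat) : Int)
      = (bCnt enter leave).getD x 0 := by
  rw [PySem.List.count_eq, PySem.List.foldl_append_eq_flatMap, List.nil_append]
  rw [count_flat]
  by_cases hc : bCommon enter leave = []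
  · have h1 : aCommonPairs (aSet1 enter) (aSet2 leave) = [] := by
      rw [List.eq_nil_iff_forall_not_mem]
      intro q hq
      rw [mem_first_iff] at hq
      have := ((mem_CPl enter leave q).mp (List.mem_of_mem_filter hq)).1
      rw [hc] at this
      exact absurd this (List.not_mem_nil)
    have h2 : aCommonPairs (aSet3 enter) (aSet4 leave) = [] := by
      rw [List.eq_nil_iff_forall_not_mem]
      intro q hq
      rw [mem_second_iff] at hq
      have := ((mem_CPl enter leave q).mp (List.mem_of_mem_filter hq)).1
      rw [hc] at this
      exact absurd this (List.not_mem_nil)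
    rw [h1, h2]
    simp [bCnt, hc, PySem.Dict.getD_empty]
  · have hbc : bCnt enter leave
        = (CPl enter leave).foldl (stepB (bPos enter) (bPos leave) (bMx enter) (bMn leave))
            PySem.Dict.empty := by
      rw [bCnt, if_pos hc, nestedB_eq]
      rfl
    rw [hbc, foldl_stepB_getD, PySem.Dict.getD_empty, zero_add]
    have hsplit : ((CPl enter leave).map
        (contribB (bPos enter) (bPos leave) (bMx enter) (bMn leave) x)).sum
        = (((CPl enter leave).filter (fun q =>
            decide ((q.1 ≠ q.2 ∧ (bPos enter).getD q.1 0 < (bPos enter).getD q.2 0) ∧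
              (bPos leave).getD q.1 0 > (bPos leave).getD q.2 0))).map (chi x)).sum
        + (((CPl enter leave).filter (fun q =>
            decide ((q.1 ≠ q.2 ∧ (bPos enter).getD q.1 0 < (bPos enter).getD q.2 0) ∧
              ((bPos enter).getD q.2 0 < bMx enter ∧ bMn leave < (bPos leave).getD q.1 0 ∧
                (bPos leave).getD q.1 0 < (bPos leave).getD q.2 0)))).map (chi x)).sum := by
      rw [List.map_congr_left (fun q _ =>
        contribB_split (bPos enter) (bPos leave) (bMx enter) (bMn leave) x q)]
      rw [PySem.List.sum_map_add_int]
      rw [sum_map_ite_filter, sum_map_ite_filter]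
    rw [hsplit]
    have perm1 : (aCommonPairs (aSet1 enter) (aSet2 leave)).Perm
        ((CPl enter leave).filter (fun q =>
          decide ((q.1 ≠ q.2 ∧ (bPos enter).getD q.1 0 < (bPos enter).getD q.2 0) ∧
            (bPos leave).getD q.1 0 > (bPos leave).getD q.2 0))) :=
      (List.perm_ext_iff_of_nodup (nodup_first enter leave)
        ((nodup_CPl enter leave).filter _)).mpr (fun q => mem_first_iff enter leave q)
    have perm2 : (aCommonPairs (aSet3 enter) (aSet4 leave)).Perm
        ((CPl enter leave).filter (fun q =>
          decide ((q.1 ≠ q.2 ∧ (bPos enter).getD q.1 0 < (bPos enter).getD q.2 0) ∧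
            ((bPos enter).getD q.2 0 < bMx enter ∧ bMn leave < (bPos leave).getD q.1 0 ∧
              (bPos leave).getD q.1 0 < (bPos leave).getD q.2 0)))) :=
      (List.perm_ext_iff_of_nodup (nodup_second enter leave)
        ((nodup_CPl enter leave).filter _)).mpr (fun q => mem_second_iff enter leave q)
    rw [List.map_append, List.sum_append]
    rw [(perm1.map (chi x)).sum_eq, (perm2.map (chi x)).sum_eq]

-- ===== VERDICT (by name: the statement is the Claim_ definition above) =====
theorem solution_spec : Claim_equal_solution := by
  intro enter leave _
  show solution enter leave = solution_alt enter leave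
  rw [solution_eq, solution_alt_eq]
  rw [PySem.List.foldl_append_singleton_eq_map, List.nil_append]
  exact List.map_congr_left (fun i _ => count_key enter leave i)
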